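-- pv_equiv track=rewrite | github.com/bhuber/pyler | py3/sandbox/stripe_interview/store_closing_problem_final.py | find_best_closing_time2
-- ===== SOURCE A (Python) =====
-- def find_best_closing_time2(hours_log: str) -> int:
--     """
--     Using compute_penalty() results in a sub-optimal O(n^2) algorithm
--     If we write it from scratch, we can do it in O(n)
--     """
--     if len(hours_log) == 0:
--         return 0
--
--     min_penalty_idx = 0
--     min_penalty_val = 0
--     curr_penalty_idx = 0
--     curr_penalty_val = 0
--     for v in hours_log.split(' '):
--         curr_penalty_idx += 1
--         # When moving the hour idx to the right, if we encounter 'N',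
--         # then penalty for lhs increases, and rhs remains the same.
--         # If we encounter 'Y', then penalty for lhs remains the same, and
--         # penalty for rhs decreases.
--         # Note curr_penalty_val is wrong, but it's off by a constant amount,
--         # i.e. the sum of 'Y' in hours_log, so min_penalty_idx will still be
--         # correct
--         curr_penalty_val += 1 if v == 'N' else -1
--         if curr_penalty_val < min_penalty_val:
--             min_penalty_val = curr_penalty_val
--             min_penalty_idx = curr_penalty_idx
--
--     return min_penalty_idx
-- ===== SOURCE B (Python) =====
-- def find_best_closing_time2(hours_log: str) -> int:
--     # Divide and conquer: each token segment is summarized as a triple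
--     # (total delta, min prefix value, earliest 1-based position of that min);
--     # halves are combined by shifting the right half's prefixes by the left total.
--     if len(hours_log) == 0:
--         return 0
--     toks = hours_log.split(' ')
--
--     def seg(lo, hi):
--         if hi - lo == 1:
--             d = 1 if toks[lo] == 'N' else -1
--             return (d, d, 1)
--         mid = (lo + hi) // 2
--         s1, m1, i1 = seg(lo, mid)
--         s2, m2, i2 = seg(mid, hi)
--         m = s1 + m2
--         if m < m1:
--             return (s1 + s2, m, (mid - lo) + i2)
--         return (s1 + s2, m1, i1)
--
--     s, m, i = seg(0, len(toks))
--     return i if m < 0 else 0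
-- ===== Notes on version B (the rewrite author's own statement) =====
-- stated objective: alternative
-- what changed: Replaces the linear running-minimum fold by a divide-and-conquer recursion: each half of the token list is summarized as a (total delta, min prefix, earliest argmin) triple and the halves are merged by shifting the right half's prefixes by the left total.
import Mathlib
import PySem

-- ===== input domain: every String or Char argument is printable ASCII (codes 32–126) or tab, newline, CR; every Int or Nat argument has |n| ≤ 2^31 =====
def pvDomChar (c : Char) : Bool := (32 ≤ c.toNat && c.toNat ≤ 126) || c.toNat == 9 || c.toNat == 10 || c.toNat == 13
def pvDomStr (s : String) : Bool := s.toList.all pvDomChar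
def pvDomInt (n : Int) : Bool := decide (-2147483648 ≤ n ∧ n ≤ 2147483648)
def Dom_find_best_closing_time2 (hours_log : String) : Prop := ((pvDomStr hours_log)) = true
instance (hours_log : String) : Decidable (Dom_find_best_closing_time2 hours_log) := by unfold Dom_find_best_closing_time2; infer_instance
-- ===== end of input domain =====

-- B replaces A's linear running-minimum fold by a divide-and-conquer recursion on the
-- token list, merging (total, min prefix, earliest argmin) summaries of the two halves
-- (objective: alternative).

-- ===== PORT A =====
-- state (min_penalty_idx, min_penalty_val, curr_penalty_idx, curr_penalty_val)
def pvStepA (st : Int × Int × Int × Int) (v : String) : Int × Int × Int × Int :=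
  let ci' := st.2.2.1 + 1
  let cv' := st.2.2.2 + (if v == "N" then (1 : Int) else -1)
  if cv' < st.2.1 then (ci', cv', ci', cv') else (st.1, st.2.1, ci', cv')

def find_best_closing_time2 (hours_log : String) : Int :=
  if PySem.Str.len hours_log = 0 then 0
  else (((PySem.Str.split? hours_log " ").getD []).foldl pvStepA (0, 0, 0, 0)).1

-- ===== PORT B =====
-- Python's seg(lo, hi) works on the segment toks[lo:hi]; the port passes that segment
-- itself and splits it with take/drop at mid = (hi-lo)//2 = (lo+hi)//2 - lo.
-- The [] branch is an unreachable totality guard (seg is only called on nonempty segments).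
def pvSeg : List String → Int × Int × Int
  | [] => (0, 0, 0)
  | [v] => let d : Int := if v == "N" then 1 else -1; (d, d, 1)
  | v1 :: v2 :: rest =>
    let mid := (v1 :: v2 :: rest).length / 2
    let L := pvSeg ((v1 :: v2 :: rest).take mid)
    let R := pvSeg ((v1 :: v2 :: rest).drop mid)
    let m := L.1 + R.2.1
    if m < L.2.1 then (L.1 + R.1, m, (mid : Int) + R.2.2)
    else (L.1 + R.1, L.2.1, L.2.2)
termination_by ts => ts.length
decreasing_by
  · simp [List.length_take]; omega
  · simp [List.length_drop]; omega

def find_best_closing_time2_alt (hours_log : String) : Int :=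
  if PySem.Str.len hours_log = 0 then 0
  else
    let r := pvSeg ((PySem.Str.split? hours_log " ").getD [])
    if r.2.1 < 0 then r.2.2 else 0

-- ===== PRECONDITION & SPEC =====
def Spec_find_best_closing_time2 (hours_log : String) (out : Int) : Prop := out = find_best_closing_time2_alt hours_log
instance (hours_log : String) (out : Int) : Decidable (Spec_find_best_closing_time2 hours_log out) := by unfold Spec_find_best_closing_time2; infer_instance

-- ===== CLAIM (what is proved, stated in full; the proofs are below) =====
def Claim_equal_find_best_closing_time2 : Prop := ∀ (hours_log : String), Dom_find_best_closing_time2 hours_log → Spec_find_best_closing_time2 hours_log (find_best_closing_time2 hours_log)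

-- ===== LEMMAS AND PROOFS =====

-- A's fold over a nonempty segment, started in any state, is determined by the
-- segment's d&c summary (total delta, min prefix value, earliest argmin).
theorem pv_main (ts : List String) (hne : ts ≠ []) :
    ∀ mi mv ci cv : Int,
      ts.foldl pvStepA (mi, mv, ci, cv) =
        (if cv + (pvSeg ts).2.1 < mv then ci + (pvSeg ts).2.2 else mi,
         if cv + (pvSeg ts).2.1 < mv then cv + (pvSeg ts).2.1 else mv,
         ci + (ts.length : Int),
         cv + (pvSeg ts).1) := by
  match ts with
  | [] => exact absurd rfl hne
  | [v] =>
    intro mi mv ci cv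
    simp only [List.foldl_cons, List.foldl_nil, pvStepA, pvSeg]
    by_cases h : cv + (if v == "N" then (1 : Int) else -1) < mv
    · simp only [if_pos h]; split_ifs <;> simp_all
    · simp only [if_neg h]; split_ifs <;> simp_all
  | v1 :: v2 :: rest =>
    intro mi mv ci cv
    set ts := v1 :: v2 :: rest with hts
    set mid := ts.length / 2 with hmid
    have hlen : 2 ≤ ts.length := by simp [hts]
    have hmid1 : 1 ≤ mid := by omega
    have hmidlt : mid < ts.length := by omega
    have hT : ts.take mid ≠ [] := by
      intro h; have := congrArg List.length h; simp [List.length_take] at this; omega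
    have hD : ts.drop mid ≠ [] := by
      intro h; have := congrArg List.length h; simp [List.length_drop] at this; omega
    have hsplit : ts = ts.take mid ++ ts.drop mid := (List.take_append_drop mid ts).symm
    have IH1 := pv_main (ts.take mid) hT mi mv ci cv
    conv_lhs => rw [hsplit]
    rw [List.foldl_append, IH1]
    rw [pv_main (ts.drop mid) hD]
    rcases hL : pvSeg (ts.take mid) with ⟨s1, m1, i1⟩
    rcases hR : pvSeg (ts.drop mid) with ⟨s2, m2, i2⟩
    have hunf : pvSeg ts =
        (if s1 + m2 < m1 then (s1 + s2, s1 + m2, (mid : Int) + i2) else (s1 + s2, m1, i1)) := by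
      conv_lhs => rw [hts]
      simp only [pvSeg]
      rw [← hts, ← hmid, hL, hR]
    have hlent : (ts.take mid).length = mid := by simp [List.length_take]; omega
    have hlend : (ts.drop mid).length = ts.length - mid := by simp [List.length_drop]
    rw [hlent, hlend]
    by_cases hc : s1 + m2 < m1
    · rw [hunf, if_pos hc]
      dsimp only
      simp only [Prod.mk.injEq]
      refine ⟨?_, ?_, ?_, ?_⟩ <;> push_cast [Nat.cast_sub hmidlt.le] <;> (first | (split_ifs <;> omega) | omega)
    · rw [hunf, if_neg hc]
      dsimp only
      simp only [Prod.mk.injEq]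
      refine ⟨?_, ?_, ?_, ?_⟩ <;> push_cast [Nat.cast_sub hmidlt.le] <;> (first | (split_ifs <;> omega) | omega)
termination_by ts.length
decreasing_by
  · simp [List.length_take]; omega
  · simp [List.length_drop]; omega

-- ===== VERDICT (by name: the statement is the Claim_ definition above) =====
theorem find_best_closing_time2_spec : Claim_equal_find_best_closing_time2 := by
  unfold Claim_equal_find_best_closing_time2 Spec_find_best_closing_time2
  intro s _
  unfold find_best_closing_time2 find_best_closing_time2_alt
  by_cases h0 : PySem.Str.len s = 0
  · rw [if_pos h0, if_pos h0]
  · simp only [if_neg h0]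
    set ts := (PySem.Str.split? s " ").getD [] with hts
    rcases heq : ts with _ | ⟨v, t⟩
    · simp [pvSeg]
    · rw [pv_main (v :: t) (by simp) 0 0 0 0]
      by_cases hm : (pvSeg (v :: t)).2.1 < 0
      · simp only [zero_add, if_pos hm]
      · simp only [zero_add, if_neg hm]
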